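-- pv_equiv track=rewrite | github.com/aaron110125/2025_files_restart | python_gns3_scripts/ospf_config_generator.py | cidr_to_wildcard
-- ===== SOURCE A (Python) =====
-- def cidr_to_wildcard(cidr):
--     """
--     Convert CIDR notation to wildcard mask.
--
--     Args:
--         cidr (str): CIDR prefix length (e.g., "24" or "/24")
--
--     Returns:
--         str: Wildcard mask in dotted decimal format
--     """
--     try:
--         # Remove leading slash if present
--         if cidr.startswith('/'):
--             cidr = cidr[1:]
--
--         # Convert CIDR to integer
--         cidr = int(cidr)
--
--         # Validate CIDR range
--         if cidr < 0 or cidr > 32: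
--             return None
--
--         # Create a binary string with cidr number of 0's followed by (32-cidr) 1's
--         binary = '0' * cidr + '1' * (32 - cidr)
--
--         # Split the binary string into 4 octets and convert to decimal
--         octets = [binary[i:i+8] for i in range(0, 32, 8)]
--         decimal_octets = [str(int(octet, 2)) for octet in octets]
--
--         # Join the octets with dots
--         return '.'.join(decimal_octets)
--     except (ValueError, TypeError):
--         return None
-- ===== SOURCE B (Python) =====
-- def cidr_to_wildcard(cidr):
--     """
--     Convert CIDR notation to wildcard mask.
--
--     Same parsing as the original; the mask itself is computed with integer
--     bit arithmetic instead of building and re-parsing a binary string.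
--     """
--     try:
--         if cidr.startswith('/'):
--             cidr = cidr[1:]
--         cidr = int(cidr)
--         if cidr < 0 or cidr > 32:
--             return None
--         mask = (1 << (32 - cidr)) - 1
--         return '.'.join(str((mask >> s) & 255) for s in (24, 16, 8, 0))
--     except (ValueError, TypeError):
--         return None
-- ===== Notes on version B (the rewrite author's own statement) =====
-- stated objective: idiomatic
-- what changed: The wildcard mask is computed as the integer (1 << (32-cidr)) - 1 and its four octets extracted by bit-shifting/masking, replacing A's construction of a 32-character binary string that is then sliced into substrings and re-parsed with int(octet, 2).
import Mathlib
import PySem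

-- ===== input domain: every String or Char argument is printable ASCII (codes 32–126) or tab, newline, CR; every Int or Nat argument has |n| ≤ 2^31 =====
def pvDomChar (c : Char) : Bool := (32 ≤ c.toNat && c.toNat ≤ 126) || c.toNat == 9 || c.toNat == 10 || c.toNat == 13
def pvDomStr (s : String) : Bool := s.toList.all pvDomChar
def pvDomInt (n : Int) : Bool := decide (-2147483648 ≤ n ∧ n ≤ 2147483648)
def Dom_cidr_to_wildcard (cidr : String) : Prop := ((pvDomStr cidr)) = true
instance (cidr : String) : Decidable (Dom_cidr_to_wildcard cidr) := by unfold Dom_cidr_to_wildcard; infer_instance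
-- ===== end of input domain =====

-- B computes the mask by integer bit arithmetic instead of A's binary-string build/slice/re-parse.

-- ===== PORT A =====
-- the body after 'cidr = int(cidr)' succeeded: range check, binary string, octet slices, base-2 parse, join
def wildA (n : Int) : Option String :=
  if n < 0 || n > 32 then none
  else
    -- binary = '0' * cidr + '1' * (32 - cidr)
    let binary : List Char :=
      PySem.List.pyRepeat ['0'] n ++ PySem.List.pyRepeat ['1'] (32 - n)
    -- octets = [binary[i:i+8] for i in range(0, 32, 8)]
    let octets : List (List Char) :=
      (PySem.List.pyRange 0 32 8).map (fun i => PySem.List.slice binary (some i) (some (i + 8)))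
    -- decimal_octets = [str(int(octet, 2)) for octet in octets]; int may raise ValueError → caught → None
    match octets.mapM (fun o => PySem.Int.ofCharsBase? o 2) with
    | none => none
    | some ds => some (PySem.Str.join "." (ds.map PySem.Int.toStr))

def cidr_to_wildcard (cidr : String) : Option String :=
  match PySem.Int.ofStr?
      (if PySem.Str.startswith cidr "/" then PySem.Str.slice cidr (some 1) none else cidr) with
  | none => none              -- ValueError from int() caught
  | some n => wildA n

-- ===== PORT B =====
-- the body after 'cidr = int(cidr)' succeeded: range check, integer mask, bit-shift octets, join
def wildB (n : Int) : Option String :=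
  if n < 0 || n > 32 then none
  else
    let mask : Int := (1 <<< (32 - n).toNat) - 1
    -- (mask >> s) & 255, exact for this nonnegative mask
    some (PySem.Str.join "."
      (([24, 16, 8, 0] : List Nat).map (fun s => PySem.Int.toStr (Int.land (Int.shiftRight mask s) 255))))

def cidr_to_wildcard_alt (cidr : String) : Option String :=
  match PySem.Int.ofStr?
      (if PySem.Str.startswith cidr "/" then PySem.Str.slice cidr (some 1) none else cidr) with
  | none => none
  | some n => wildB n

-- ===== PRECONDITION & SPEC =====
def Spec_cidr_to_wildcard (cidr : String) (out : Option String) : Prop := out = cidr_to_wildcard_alt cidr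
instance (cidr : String) (out : Option String) : Decidable (Spec_cidr_to_wildcard cidr out) := by unfold Spec_cidr_to_wildcard; infer_instance

-- ===== CLAIM (what is proved, stated in full; the proofs are below) =====
def Claim_equal_cidr_to_wildcard : Prop := ∀ (cidr : String), Dom_cidr_to_wildcard cidr → Spec_cidr_to_wildcard cidr (cidr_to_wildcard cidr)

-- ===== LEMMAS AND PROOFS =====
theorem wildA_eq_wildB (n : Int) : wildA n = wildB n := by
  by_cases h : n < 0 || n > 32
  · simp [wildA, wildB, h]
  · have h0 : 0 ≤ n := by simp at h; omega
    have h32 : n ≤ 32 := by simp at h; omega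
    interval_cases n <;> decide

-- ===== VERDICT (by name: the statement is the Claim_ definition above) =====
theorem cidr_to_wildcard_spec : Claim_equal_cidr_to_wildcard := by
  intro cidr _
  unfold Spec_cidr_to_wildcard cidr_to_wildcard cidr_to_wildcard_alt
  cases PySem.Int.ofStr?
      (if PySem.Str.startswith cidr "/" then PySem.Str.slice cidr (some 1) none else cidr) with
  | none => rfl
  | some n => exact wildA_eq_wildB n
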